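-- pv_equiv track=rewrite | github.com/DSRschool/Anaya-Eday | cap10/src/algoritmos/CompresionHuffman.py | comprimir
-- ===== SOURCE A (Python) =====
-- def comprimir(dicc, contenido):
--     res = "1"
--     for letra in contenido:
--         codigo = dicc[letra]
--         res = res + codigo
--     res = res + dicc['end']
--     # Agregamos ceros para que la longitud del resultado sea un múltiplo de 8
--     res = res + (len(res) % 8 * "0")
--     return int(res, 2) # Convertimos el string en base 2 a entero
-- ===== SOURCE B (Python) =====
-- def comprimir(dicc, contenido):
--     # Integer accumulator with bit arithmetic instead of building a bit-string and parsing it.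
--     res = 1
--     n = 1
--     for letra in contenido:
--         for bit in dicc[letra]:
--             res = res * 2 + (1 if bit == '1' else 0)
--             n += 1
--     for bit in dicc['end']:
--         res = res * 2 + (1 if bit == '1' else 0)
--         n += 1
--     return res << (n % 8)
-- ===== Notes on version B (the rewrite author's own statement) =====
-- stated objective: alternative
-- what changed: B accumulates the result directly as an integer with shift/add bit arithmetic (plus a bit counter) instead of concatenating a bit-string character by character and parsing it with int(res, 2).
-- outside the precondition, e.g. on comprimir({'a': '1_0', 'end': '1'}, 'a'): A returns 416, B returns 800
import Mathlib
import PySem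

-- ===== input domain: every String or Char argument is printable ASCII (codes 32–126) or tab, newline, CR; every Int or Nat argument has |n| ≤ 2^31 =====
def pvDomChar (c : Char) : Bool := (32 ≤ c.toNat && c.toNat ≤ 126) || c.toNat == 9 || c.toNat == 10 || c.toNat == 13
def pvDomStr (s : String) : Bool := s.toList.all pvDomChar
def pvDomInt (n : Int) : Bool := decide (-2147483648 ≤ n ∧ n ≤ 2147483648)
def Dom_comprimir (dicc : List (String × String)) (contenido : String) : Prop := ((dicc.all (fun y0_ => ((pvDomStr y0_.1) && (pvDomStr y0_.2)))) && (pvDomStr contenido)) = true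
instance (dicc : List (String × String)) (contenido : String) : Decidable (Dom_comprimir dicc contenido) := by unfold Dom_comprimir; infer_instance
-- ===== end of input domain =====

-- B builds the output integer with bit arithmetic instead of concatenating a bit-string and parsing it (alternative decomposition, same cost).

set_option maxRecDepth 8000


-- ===== PORT A =====
-- hand port of Python's int(cs, 2), exact on the strings that reach it under Pre_comprimir:
-- nonempty strings of '0'/'1' digits parse to their binary value, anything else is a ValueError (none)
def pyIntBase2? (cs : List Char) : Option Int :=
  if cs ≠ [] ∧ cs.all (fun c => c == '0' || c == '1') then
    some (cs.foldl (fun a c => a * 2 + (if c == '1' then 1 else 0)) 0)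
  else none

def comprimir (dicc : List (String × String)) (contenido : String) : Int :=
  let res : List Char :=
    contenido.toList.foldl
      (fun res letra => res ++ ((dicc.lookup (String.ofList [letra])).getD "").toList) ['1']
  let res2 := res ++ ((dicc.lookup "end").getD "").toList
  let res3 := res2 ++ List.replicate (res2.length % 8) '0'
  (pyIntBase2? res3).getD 0

-- ===== PORT B =====
def comprimir_alt (dicc : List (String × String)) (contenido : String) : Int :=
  let step : Int × Nat → Char → Int × Nat :=
    fun st bit => (st.1 * 2 + (if bit == '1' then 1 else 0), st.2 + 1)
  let st1 :=
    contenido.toList.foldl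
      (fun st letra => (((dicc.lookup (String.ofList [letra])).getD "").toList.foldl step st))
      ((1 : Int), (1 : Nat))
  let st2 := ((dicc.lookup "end").getD "").toList.foldl step st1
  st2.1 * 2 ^ (st2.2 % 8)

-- ===== PRECONDITION & SPEC =====
def pvOk (o : Option String) : Bool :=
  match o with
  | some s => s.toList.all (fun c => c == '0' || c == '1')
  | none => false

-- Pre_ excludes inputs where a used letter or the 'end' key is missing from dicc (KeyError) or a used
-- code has a character other than '0'/'1': A then raises ValueError, except for codes Python's int(.,2)
-- accidentally accepts (an underscore between digits, stray whitespace) — an artefact of string parsing.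
def Pre_comprimir (dicc : List (String × String)) (contenido : String) : Prop :=
  (pvOk (dicc.lookup "end") &&
   contenido.toList.all (fun c => pvOk (dicc.lookup (String.ofList [c])))) = true
instance (dicc : List (String × String)) (contenido : String) : Decidable (Pre_comprimir dicc contenido) := by unfold Pre_comprimir; infer_instance

def pvWitness_comprimir : (List (String × String)) × String := ([("a", "0"), ("end", "1")], "a")

def Spec_comprimir (dicc : List (String × String)) (contenido : String) (out : Int) : Prop := out = comprimir_alt dicc contenido
instance (dicc : List (String × String)) (contenido : String) (out : Int) : Decidable (Spec_comprimir dicc contenido out) := by unfold Spec_comprimir; infer_instance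

-- ===== CLAIM (what is proved, stated in full; the proofs are below) =====
def Claim_equal_comprimir : Prop := ∀ (dicc : List (String × String)) (contenido : String), Dom_comprimir dicc contenido → Pre_comprimir dicc contenido → Spec_comprimir dicc contenido (comprimir dicc contenido)

-- ===== LEMMAS AND PROOFS =====

theorem bitval_append (xs ys : List Char) (a : Int) :
    (xs ++ ys).foldl (fun a c => a * 2 + (if c == '1' then 1 else 0)) a
      = ys.foldl (fun a c => a * 2 + (if c == '1' then 1 else 0))
          (xs.foldl (fun a c => a * 2 + (if c == '1' then 1 else 0)) a) := by
  simp [List.foldl_append]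

theorem bitval_replicate (k : Nat) (a : Int) :
    (List.replicate k '0').foldl (fun a c => a * 2 + (if c == '1' then 1 else 0)) a
      = a * 2 ^ k := by
  induction k generalizing a with
  | zero => simp
  | succ k ih =>
    rw [List.replicate_succ, List.foldl_cons, ih]
    simp [pow_succ]
    ring

theorem step_fold (cs : List Char) (a : Int) (n : Nat) :
    cs.foldl (fun (st : Int × Nat) bit => (st.1 * 2 + (if bit == '1' then 1 else 0), st.2 + 1)) (a, n)
      = (cs.foldl (fun a c => a * 2 + (if c == '1' then 1 else 0)) a, n + cs.length) := by
  induction cs generalizing a n with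
  | nil => simp
  | cons c cs ih =>
    rw [List.foldl_cons, List.foldl_cons, ih]
    simp [Nat.add_comm, Nat.add_left_comm]

-- ===== VERDICT (by name: the statement is the Claim_ definition above) =====
theorem binOk_getD {o : Option String} (h : pvOk o = true) :
    ((o.getD "").toList.all (fun c => c == '0' || c == '1')) = true := by
  cases o <;> simp [pvOk] at h ⊢ <;> exact h

theorem comprimir_spec : Claim_equal_comprimir := by
  intro dicc contenido _ hpre
  unfold Pre_comprimir at hpre
  rw [Bool.and_eq_true] at hpre
  obtain ⟨hend, hall'⟩ := hpre
  have hall := List.all_eq_true.mp hall'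
  unfold Spec_comprimir comprimir comprimir_alt
  simp only [PySem.List.foldl_append_eq_flatMap, ← List.foldl_flatMap, step_fold]
  set g : Char → List Char :=
    fun letra => ((dicc.lookup (String.ofList [letra])).getD "").toList with hg
  set e : List Char := ((dicc.lookup "end").getD "").toList with he
  set F : List Char := contenido.toList.flatMap g with hF
  have hFbin : F.all (fun c => c == '0' || c == '1') = true := by
    rw [List.all_eq_true]
    intro x hx
    rw [hF, List.mem_flatMap] at hx
    obtain ⟨c, hc, hxg⟩ := hx
    have := binOk_getD (hall c hc)
    rw [List.all_eq_true] at this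
    exact this x hxg
  have hebin : e.all (fun c => c == '0' || c == '1') = true := binOk_getD hend
  rw [pyIntBase2?]
  rw [if_pos]
  · rw [Option.getD_some]
    rw [bitval_append, bitval_append, bitval_replicate]
    rw [bitval_append]
    have hlen : ((['1'] ++ F) ++ e).length % 8 = (1 + F.length + e.length) % 8 := by
      simp [List.length_append]; omega
    rw [hlen]
    norm_num
  · constructor
    · simp
    · simp [List.all_append, hFbin, hebin]
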